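-- pv_equiv track=rewrite | github.com/dapaohou/TianChi_IndustryAI | cleanData.py | create_unique_Dictionary
-- ===== SOURCE A (Python) =====
-- def create_unique_Dictionary(unique_elements):
--     x = 0
--     text_digit_vals = {}
--     for unique in unique_elements:
--         if unique not in text_digit_vals:
--             text_digit_vals[unique] = x
--             x += 1
--     return text_digit_vals
-- ===== SOURCE B (Python) =====
-- def create_unique_Dictionary(unique_elements):
--     first_positions = sorted({unique_elements.index(v) for v in unique_elements})
--     return {unique_elements[i]: rank for rank, i in enumerate(first_positions)}
-- ===== Notes on version B (the rewrite author's own statement) =====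
-- stated objective: alternative
-- what changed: Instead of one fused pass with a counter and a membership guard, B computes the set of first-occurrence positions via index(), sorts them, and assigns each element its rank among those sorted positions.
import Mathlib
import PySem

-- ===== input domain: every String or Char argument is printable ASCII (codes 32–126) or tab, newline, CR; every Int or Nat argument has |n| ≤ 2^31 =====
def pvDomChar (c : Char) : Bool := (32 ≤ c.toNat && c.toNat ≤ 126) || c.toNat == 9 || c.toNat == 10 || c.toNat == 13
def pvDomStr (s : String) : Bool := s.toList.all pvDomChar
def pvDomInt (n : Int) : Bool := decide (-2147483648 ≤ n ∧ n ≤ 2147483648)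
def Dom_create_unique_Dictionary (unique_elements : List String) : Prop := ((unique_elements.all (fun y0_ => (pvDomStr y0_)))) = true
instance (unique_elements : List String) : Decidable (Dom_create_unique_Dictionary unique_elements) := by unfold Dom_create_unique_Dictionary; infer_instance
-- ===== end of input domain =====

-- B replaces A's fused counter-plus-membership loop by a different algorithm: collect the set of
-- first-occurrence positions (via index()), sort it, and assign ranks positionally (alternative, not faster).

-- ===== PORT A =====
-- A's loop: counter x starts at 0, a dict accumulates first occurrences, x increments on each insertion.
def create_unique_Dictionary (unique_elements : List String) : List (String × Int) :=
  (unique_elements.foldl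
    (fun (st : Int × PySem.Dict String Int) unique =>
      if st.2.contains unique = false then (st.1 + 1, st.2.insert unique st.1) else st)
    (0, PySem.Dict.empty)).2.items

-- ===== PORT B =====
-- Source B: first_positions = sorted({unique_elements.index(v) for v in unique_elements});
--       return {unique_elements[i]: rank for rank, i in enumerate(first_positions)}
-- index(v) and [i] never raise here (v is drawn from the list, i is an index() result),
-- so the total '.getD' reading of index?/pyGet? is faithful.
def create_unique_Dictionary_alt (unique_elements : List String) : List (String × Int) :=
  let first_positions : List Int :=
    PySem.List.sorted
      (PySem.Set.ofList (unique_elements.map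
        (fun v => (((PySem.List.index? unique_elements v).getD 0 : Nat) : Int))))
      (fun x => x) false
  ((PySem.List.enumerate first_positions 0).foldl
      (fun (d : PySem.Dict String Int) p =>
        d.insert ((PySem.List.pyGet? unique_elements p.2).getD "") p.1)
      PySem.Dict.empty).items

-- ===== PRECONDITION & SPEC =====
def Spec_create_unique_Dictionary (unique_elements : List String) (out : List (String × Int)) : Prop := out = create_unique_Dictionary_alt unique_elements
instance (unique_elements : List String) (out : List (String × Int)) : Decidable (Spec_create_unique_Dictionary unique_elements out) := by unfold Spec_create_unique_Dictionary; infer_instance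

-- ===== CLAIM (what is proved, stated in full; the proofs are below) =====
def Claim_equal_create_unique_Dictionary : Prop := ∀ (unique_elements : List String), Dom_create_unique_Dictionary unique_elements → Spec_create_unique_Dictionary unique_elements (create_unique_Dictionary unique_elements)

-- ===== LEMMAS AND PROOFS =====

-- the dict that maps each element of s to its position, as a Dict value
def pvMkD (s : List String) : PySem.Dict String Int :=
  PySem.Dict.mk ((PySem.List.enumerate s 0).map (fun p => (p.2, p.1)))

theorem pvMkD_contains (s : List String) (u : String) :
    (pvMkD s).contains u = decide (u ∈ s) := by
  have hk : (pvMkD s).keys = s := by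
    simp [pvMkD, PySem.Dict.keys_mk, List.map_map, Function.comp_def]
  rw [PySem.Dict.contains_eq_decide_mem_keys, hk]

theorem pvMkD_append (s : List String) (u : String) (hu : u ∉ s) :
    pvMkD (s ++ [u]) = (pvMkD s).insert u (s.length : Int) := by
  have hc : (pvMkD s).contains u = false := by simp [pvMkD_contains, hu]
  have hinj : ∀ (a b : PySem.Dict String Int), a.items = b.items → a = b := by
    intro a b h; cases a; cases b; simpa using h
  apply hinj
  rw [PySem.Dict.items_insert_of_not_contains (pvMkD s) ((s.length : Int)) hc]
  simp [pvMkD, PySem.List.enumerate_append, PySem.List.enumerate_cons, PySem.List.enumerate_nil]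

-- A's fold, started at a state coming from a nodup prefix s, lands at the state of s with
-- xs's fresh elements appended (i.e. of s.foldl Set.add).
theorem pvLoopA (xs : List String) : ∀ (s : List String), s.Nodup →
    xs.foldl
      (fun (st : Int × PySem.Dict String Int) unique =>
        if st.2.contains unique = false then (st.1 + 1, st.2.insert unique st.1) else st)
      ((s.length : Int), pvMkD s)
    = (((xs.foldl PySem.Set.add s).length : Int), pvMkD (xs.foldl PySem.Set.add s)) := by
  induction xs with
  | nil => intro s _; simp
  | cons u xs ih =>
    intro s hs
    by_cases h : u ∈ s
    · have hc : (pvMkD s).contains u = true := by simp [pvMkD_contains, h]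
      have ha : PySem.Set.add s u = s := by simp [PySem.Set.add, PySem.Set.contains, h]
      simp only [List.foldl_cons, hc]
      simpa [ha] using ih s hs
    · have hc : (pvMkD s).contains u = false := by simp [pvMkD_contains, h]
      have ha : PySem.Set.add s u = s ++ [u] := by simp [PySem.Set.add, PySem.Set.contains, h]
      simp only [List.foldl_cons, hc]
      have hn : (s ++ [u]).Nodup := by
        simp [List.nodup_append, hs]
        exact fun a ha he => h (he ▸ ha)
      have := ih (s ++ [u]) hn
      simp only [ha]
      rw [← this, pvMkD_append s u h]
      norm_num

-- ---------- B side ----------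

-- first-occurrence position of v in xs (Nat form of B's 'unique_elements.index(v)')
def pvFi (xs : List String) (v : String) : Nat := (PySem.List.index? xs v).getD 0

theorem pvFi_get (xs : List String) (v : String) (hv : v ∈ xs) :
    pvFi xs v < xs.length ∧ xs[pvFi xs v]? = some v := by
  obtain ⟨k, hk⟩ := Option.isSome_iff_exists.mp ((PySem.List.index?_isSome_iff xs v).mpr hv)
  obtain ⟨hlt, hget, -⟩ := PySem.List.getElem_of_index?_eq_some hk
  have hfi : pvFi xs v = k := by unfold pvFi; rw [hk]; rfl
  rw [hfi]
  exact ⟨hlt, by rw [List.getElem?_eq_getElem hlt, hget]⟩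

theorem pvFi_inj (xs : List String) (a b : String) (ha : a ∈ xs) (hb : b ∈ xs)
    (h : pvFi xs a = pvFi xs b) : a = b := by
  obtain ⟨-, hga⟩ := pvFi_get xs a ha
  obtain ⟨-, hgb⟩ := pvFi_get xs b hb
  rw [h] at hga
  exact Option.some_injective _ (hga.symm.trans hgb)

-- mapping an (on-members) injective function commutes with the Set.add fold
theorem pvFoldlAddMap {α β : Type} [BEq α] [LawfulBEq α] [BEq β] [LawfulBEq β] (f : α → β) :
    ∀ (xs t : List α),
      (∀ a, (a ∈ xs ∨ a ∈ t) → ∀ b, (b ∈ xs ∨ b ∈ t) → f a = f b → a = b) →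
      (xs.map f).foldl PySem.Set.add (t.map f) = (xs.foldl PySem.Set.add t).map f := by
  intro xs
  induction xs with
  | nil => intro t _; simp
  | cons x xs ih =>
    intro t hinj
    have hadd : PySem.Set.add (t.map f) (f x) = (PySem.Set.add t x).map f := by
      by_cases h : x ∈ t
      · have : f x ∈ t.map f := List.mem_map_of_mem h
        simp [PySem.Set.add, PySem.Set.contains, h, this]
      · have : f x ∉ t.map f := by
          intro hm
          obtain ⟨y, hy, hyx⟩ := List.mem_map.mp hm
          exact h ((hinj y (Or.inr hy) x (Or.inl (List.mem_cons_self)) hyx) ▸ hy)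
        simp [PySem.Set.add, PySem.Set.contains, h, this]
    simp only [List.map_cons, List.foldl_cons, hadd]
    apply ih
    intro a haa b hbb
    have hsub : ∀ c, c ∈ PySem.Set.add t x → c ∈ x :: xs ∨ c ∈ t := by
      intro c hc
      rcases (PySem.Set.mem_add t x c).mp hc with h | h
      · exact Or.inr h
      · exact Or.inl (h ▸ List.mem_cons_self)
    have ha' : a ∈ x :: xs ∨ a ∈ t := by
      rcases haa with h | h
      · exact Or.inl (List.mem_cons_of_mem _ h)
      · exact hsub a h
    have hb' : b ∈ x :: xs ∨ b ∈ t := by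
      rcases hbb with h | h
      · exact Or.inl (List.mem_cons_of_mem _ h)
      · exact hsub b h
    exact hinj a ha' b hb'

theorem pvOfListMap {α β : Type} [BEq α] [LawfulBEq α] [BEq β] [LawfulBEq β] (f : α → β)
    (xs : List α) (hinj : ∀ a ∈ xs, ∀ b ∈ xs, f a = f b → a = b) :
    PySem.Set.ofList (xs.map f) = (PySem.List.dedup xs).map f := by
  rw [PySem.List.dedup_eq_ofList, PySem.Set.ofList_eq_foldl, PySem.Set.ofList_eq_foldl]
  have := pvFoldlAddMap f xs []
    (by intro a ha b hb; rcases ha with h | h; rcases hb with h' | h'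
        · exact hinj a h b h'
        · simp at h'
        · simp at h)
  simpa using this

theorem pvDedupAppend (xs : List String) (v : String) :
    PySem.List.dedup (xs ++ [v]) =
      if v ∈ xs then PySem.List.dedup xs else PySem.List.dedup xs ++ [v] := by
  rw [PySem.List.dedup_eq_ofList, PySem.List.dedup_eq_ofList,
      PySem.Set.ofList_eq_foldl, PySem.Set.ofList_eq_foldl, List.foldl_append]
  have hmem : v ∈ xs.foldl PySem.Set.add [] ↔ v ∈ xs := by
    rw [← PySem.Set.ofList_eq_foldl]; simp [PySem.Set.mem_ofList]
  by_cases h : v ∈ xs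
  · simp [PySem.Set.add, PySem.Set.contains, hmem, h]
  · simp [PySem.Set.add, PySem.Set.contains, hmem, h]

theorem pvFiMemAppend (xs : List String) (v a : String) (ha : a ∈ xs) :
    pvFi (xs ++ [v]) a = pvFi xs a := by
  simp only [pvFi]
  rw [PySem.List.index?_append_of_mem [v] ha]

-- first-occurrence positions are strictly increasing along the ordered dedup
theorem pvPairwise (xs : List String) :
    (PySem.List.dedup xs).Pairwise (fun a b => pvFi xs a < pvFi xs b) := by
  induction xs using List.reverseRecOn with
  | nil => simp [PySem.List.dedup]
  | append_singleton xs v ih =>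
    rw [pvDedupAppend]
    by_cases h : v ∈ xs
    · simp only [h, if_pos]
      exact ih.imp_of_mem (fun {a b} ha hb hr => by
        rw [pvFiMemAppend xs v a ((PySem.List.mem_dedup xs a).mp ha),
            pvFiMemAppend xs v b ((PySem.List.mem_dedup xs b).mp hb)]
        exact hr)
    · simp only [h, if_neg, not_false_iff]
      rw [List.pairwise_append]
      refine ⟨ih.imp_of_mem (fun {a b} ha hb hr => by
          rw [pvFiMemAppend xs v a ((PySem.List.mem_dedup xs a).mp ha),
              pvFiMemAppend xs v b ((PySem.List.mem_dedup xs b).mp hb)]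
          exact hr), List.pairwise_singleton _ _, ?_⟩
      intro a ha b hb
      rw [List.mem_singleton] at hb
      rw [hb]
      have haxs : a ∈ xs := (PySem.List.mem_dedup xs a).mp ha
      rw [pvFiMemAppend xs v a haxs]
      have hv : pvFi (xs ++ [v]) v = xs.length := by
        simp only [pvFi]
        rw [PySem.List.index?_append_singleton_self xs v h]
        simp
      rw [hv]
      exact (pvFi_get xs a haxs).1

-- the sorted set of first positions IS the dedup's positions, in order
theorem pvSortedPositions (xs : List String) :
    PySem.List.sorted
      (PySem.Set.ofList (xs.map (fun v => ((pvFi xs v : Nat) : Int))))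
      (fun x => x) false
    = (PySem.List.dedup xs).map (fun v => ((pvFi xs v : Nat) : Int)) := by
  rw [pvOfListMap (fun v => ((pvFi xs v : Nat) : Int)) xs
        (fun a ha b hb h => pvFi_inj xs a b ha hb (by simpa using h))]
  refine PySem.List.sorted_eq_of_perm_of_pairwise_lt _ _ _ List.Perm.rfl ?_
  rw [List.pairwise_map]
  exact (pvPairwise xs).imp (fun h => by exact_mod_cast h)

-- indexing back through the positions recovers the dedup
theorem pvMapBack (xs : List String) :
    ((PySem.List.dedup xs).map (fun v => ((pvFi xs v : Nat) : Int))).map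
      (fun i => (PySem.List.pyGet? xs i).getD "")
    = PySem.List.dedup xs := by
  rw [List.map_map]
  have : ∀ v ∈ PySem.List.dedup xs,
      ((fun i => (PySem.List.pyGet? xs i).getD "") ∘ fun v => ((pvFi xs v : Nat) : Int)) v = v := by
    intro v hv
    have hm := (pvFi_get xs v ((PySem.List.mem_dedup xs v).mp hv)).2
    simp [Function.comp, PySem.List.pyGet?_natCast, hm]
  calc (PySem.List.dedup xs).map _ = (PySem.List.dedup xs).map id := List.map_congr_left this
    _ = PySem.List.dedup xs := List.map_id _

-- the final enumerate-and-insert fold is the position dict of the dedup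
theorem pvEnumSwap (g : Int → String) :
    ∀ (L : List Int) (dd : List String) (s : Int), L.map g = dd →
      (PySem.List.enumerate L s).map (fun p => (g p.2, p.1))
      = (PySem.List.enumerate dd s).map (fun p => (p.2, p.1)) := by
  intro L
  induction L with
  | nil => intro dd s h; rw [← h]; simp [PySem.List.enumerate_nil]
  | cons i L ih =>
    intro dd s h
    cases dd with
    | nil => simp at h
    | cons d dd =>
      simp only [List.map_cons, List.cons.injEq] at h
      simp [PySem.List.enumerate_cons, h.1, ih dd (s + 1) h.2]

theorem pvMapSndComp {α β : Type} (g : α → β) :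
    ∀ (L : List α) (s : Int),
      (PySem.List.enumerate L s).map (fun p => g p.2) = L.map g := by
  intro L
  induction L with
  | nil => intro s; simp [PySem.List.enumerate_nil]
  | cons x L ih => intro s; simp [PySem.List.enumerate_cons, ih (s + 1)]

theorem pvAltItems (xs : List String) :
    create_unique_Dictionary_alt xs = (pvMkD (PySem.List.dedup xs)).items := by
  unfold create_unique_Dictionary_alt
  simp only []
  rw [show (fun v => (((PySem.List.index? xs v).getD 0 : Nat) : Int))
        = (fun v => ((pvFi xs v : Nat) : Int)) from rfl,
      pvSortedPositions]
  set L := (PySem.List.dedup xs).map (fun v => ((pvFi xs v : Nat) : Int)) with hL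
  have hmapk : L.map (fun i => (PySem.List.pyGet? xs i).getD "") = PySem.List.dedup xs :=
    pvMapBack xs
  have hfresh := PySem.Dict.items_foldl_insert_fresh
    (PySem.List.enumerate L 0)
    (fun p => (PySem.List.pyGet? xs p.2).getD "") (fun p => p.1) PySem.Dict.empty
    (by intro a _; exact PySem.Dict.contains_empty _)
    (by
      rw [pvMapSndComp (fun i => (PySem.List.pyGet? xs i).getD "") L 0, hmapk]
      exact PySem.List.nodup_dedup xs)
  rw [hfresh]
  have := pvEnumSwap (fun i => (PySem.List.pyGet? xs i).getD "") L (PySem.List.dedup xs) 0 hmapk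
  simp [PySem.Dict.empty, pvMkD, this]

-- ===== VERDICT (by name: the statement is the Claim_ definition above) =====
theorem create_unique_Dictionary_spec : Claim_equal_create_unique_Dictionary := by
  intro xs _
  show create_unique_Dictionary xs = create_unique_Dictionary_alt xs
  unfold create_unique_Dictionary
  rw [show ((0 : Int), PySem.Dict.empty) = (((List.length ([] : List String) : Int)), pvMkD []) from rfl,
      pvLoopA xs [] List.nodup_nil, pvAltItems,
      PySem.List.dedup_eq_ofList, PySem.Set.ofList_eq_foldl]
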